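-- pv_equiv track=rewrite | github.com/secworks/advent_of_code_2016 | day04/day04.py | get_room_data_stats
-- ===== SOURCE A (Python) =====
-- def get_room_data_stats(room_data):
--     stats = []
--
--     for room in room_data:
--         (room_enc_name, room_id, room_checksm) = room
--         chr_stats = {}
--         for c in room_enc_name:
--             if c in chr_stats:
--                 chr_stats[c] += 1
--             else:
--                 chr_stats[c] = 1
--         stats.append(chr_stats)
--     return stats
-- ===== SOURCE B (Python) =====
-- def get_room_data_stats(room_data):
--     def counts(chars):
--         # partition recursion: peel off all copies of the first character,
--         # record its count, recurse on what is left (first-occurrence order)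
--         if not chars:
--             return {}
--         c = chars[0]
--         same = [x for x in chars if x == c]
--         rest = [x for x in chars if x != c]
--         d = {c: len(same)}
--         d.update(counts(rest))
--         return d
--
--     return [counts(list(room_enc_name))
--             for room_enc_name, room_id, room_checksm in room_data]
-- ===== Notes on version B (the rewrite author's own statement) =====
-- stated objective: alternative
-- what changed: Replaces A's single-pass incremental dict counting with a partition recursion: repeatedly split the name on its first character, record that character's count from the partition, and recurse on the remainder.
import Mathlib
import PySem

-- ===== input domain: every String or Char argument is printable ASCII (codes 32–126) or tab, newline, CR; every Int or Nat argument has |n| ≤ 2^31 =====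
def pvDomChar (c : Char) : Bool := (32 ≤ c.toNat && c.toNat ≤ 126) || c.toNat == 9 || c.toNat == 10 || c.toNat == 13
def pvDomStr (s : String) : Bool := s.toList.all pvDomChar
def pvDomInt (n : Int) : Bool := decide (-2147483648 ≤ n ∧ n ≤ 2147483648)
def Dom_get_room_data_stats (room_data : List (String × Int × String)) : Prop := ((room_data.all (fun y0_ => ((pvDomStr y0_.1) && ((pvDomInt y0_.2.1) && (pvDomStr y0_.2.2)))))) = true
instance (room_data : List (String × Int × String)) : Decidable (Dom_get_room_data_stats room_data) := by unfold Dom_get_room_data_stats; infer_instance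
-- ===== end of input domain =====

-- B replaces A's single-pass incremental dict counting by a partition recursion per room:
-- peel off all copies of the name's first character, record its count, recurse on the rest.

-- ===== PORT A =====
-- 'for c in room_enc_name' iterates one-character strings: we fold over the list of
-- one-character strings of the name.
def get_room_data_stats (room_data : List (String × Int × String)) : List (List (String × Int)) :=
  room_data.foldl (fun stats room =>
    stats ++ [((room.1.toList.map (fun ch => String.ofList [ch])).foldl
      (fun d c => if d.contains c then d.insert c (d.getD c 0 + 1) else d.insert c 1)
      (PySem.Dict.empty : PySem.Dict String Int)).items]) []

-- ===== PORT B =====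
-- Source B's helper 'counts': partition on the first character, recurse on the remainder;
-- the recursive result's keys never contain c, so d.update appends (ported as cons).
def pvCountsB : List String → List (String × Int)
  | [] => []
  | c :: t =>
    (c, (((c :: t).filter (fun x => x == c)).length : Int)) ::
      pvCountsB ((c :: t).filter (fun x => x != c))
termination_by cs => cs.length
decreasing_by
  simp only [List.filter_cons, bne_self_eq_false]
  simpa using Nat.lt_succ_of_le (List.length_filter_le _ t)

def get_room_data_stats_alt (room_data : List (String × Int × String)) : List (List (String × Int)) :=
  room_data.map (fun room => pvCountsB (room.1.toList.map (fun ch => String.ofList [ch])))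

-- ===== PRECONDITION & SPEC =====
def Spec_get_room_data_stats (room_data : List (String × Int × String)) (out : List (List (String × Int))) : Prop := out = get_room_data_stats_alt room_data
instance (room_data : List (String × Int × String)) (out : List (List (String × Int))) : Decidable (Spec_get_room_data_stats room_data out) := by unfold Spec_get_room_data_stats; infer_instance

-- ===== CLAIM (what is proved, stated in full; the proofs are below) =====
def Claim_equal_get_room_data_stats : Prop := ∀ (room_data : List (String × Int × String)), Dom_get_room_data_stats room_data → Spec_get_room_data_stats room_data (get_room_data_stats room_data)

-- ===== LEMMAS AND PROOFS =====

-- getD on an absent key returns the default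
lemma pv_getD_of_not_contains (l : List (String × Int)) (c : String)
    (h : (PySem.Dict.mk l).contains c = false) : (PySem.Dict.mk l).getD c 0 = 0 := by
  induction l with
  | nil => rfl
  | cons p rest ih =>
    obtain ⟨k, v⟩ := p
    simp only [PySem.Dict.contains_mk, List.any_cons, Bool.or_eq_false_iff] at h
    obtain ⟨hk, hr⟩ := h
    have := ih (by simp [PySem.Dict.contains_mk, hr])
    simpa [PySem.Dict.getD, PySem.Dict.get?_mk_cons, hk] using this

-- A's per-room counting loop is the counter: its items are first-occurrence pairs.
lemma pv_room_A (cs : List String) :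
    (cs.foldl (fun d c => if d.contains c then d.insert c (d.getD c 0 + 1) else d.insert c 1)
      (PySem.Dict.empty : PySem.Dict String Int)).items
    = (PySem.List.dedup cs).map (fun c => (c, (cs.count c : Int))) := by
  have hstep : cs.foldl (fun d c => if d.contains c then d.insert c (d.getD c 0 + 1) else d.insert c 1)
      (PySem.Dict.empty : PySem.Dict String Int)
      = cs.foldl (fun d c => d.insert c (d.getD c 0 + 1)) PySem.Dict.empty := by
    apply PySem.List.foldl_congr_mem
    intro d c _
    by_cases h : d.contains c
    · simp [h]
    · cases d with
      | mk l =>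
        simp only [Bool.not_eq_true] at h
        simp [h, pv_getD_of_not_contains l c h]
  rw [hstep, PySem.Dict.foldl_insert_getD_add_one_eq_counter, PySem.Dict.items_counter]
  simp

-- folding Set.add ignores elements already in the accumulator
lemma pv_foldl_add_filter (c : String) (l : List String) : ∀ (acc : List String),
    acc.contains c = true →
    List.foldl PySem.Set.add acc l = List.foldl PySem.Set.add acc (l.filter (fun x => x != c)) := by
  induction l with
  | nil => intro acc _; rfl
  | cons x xs ih =>
    intro acc hacc
    by_cases hx : (x == c) = true
    · have hxc : x = c := eq_of_beq hx
      subst hxc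
      have hmem : x ∈ acc := by simpa using hacc
      have hadd : PySem.Set.add acc x = acc := by
        simp [PySem.Set.add, PySem.Set.contains, hmem]
      simp [hadd, ih acc hacc]
    · have hkeep : (x != c) = true := by simp [bne]; simpa using hx
      have hacc' : (PySem.Set.add acc x).contains c = true := by
        unfold PySem.Set.add
        split
        · exact hacc
        · simpa [PySem.Set.contains] using Or.inl hacc
      simp [hkeep, List.foldl_cons, ih _ hacc']

-- a head never revisited stays in front of the fold
lemma pv_foldl_add_cons (c : String) (l : List String)
    (hl : ∀ x ∈ l, (x == c) = false) : ∀ (s : List String),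
    List.foldl PySem.Set.add (c :: s) l = c :: List.foldl PySem.Set.add s l := by
  induction l with
  | nil => intro s; rfl
  | cons x xs ih =>
    intro s
    have hx := hl x (by simp)
    have hne : x ≠ c := fun h => by simp [h] at hx
    have hcontains : (c :: s).contains x = (s.contains x) := by
      simp [hne]
    have hstep : PySem.Set.add (c :: s) x
        = c :: PySem.Set.add s x := by
      unfold PySem.Set.add
      simp only [PySem.Set.contains, hcontains]
      split <;> simp_all
    have hxs : ∀ y ∈ xs, (y == c) = false := fun y hy => hl y (by simp [hy])
    simp [List.foldl_cons, hstep, ih hxs]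

-- dedup on a cons: head first, then dedup of the tail with the head removed
lemma pv_dedup_cons (c : String) (t : List String) :
    PySem.List.dedup (c :: t) = c :: PySem.List.dedup (t.filter (fun x => x != c)) := by
  have h1 : PySem.List.dedup (c :: t) = List.foldl PySem.Set.add [c] t := by
    simp [PySem.List.dedup, PySem.Set.ofList, List.foldl_cons, PySem.Set.add,
      PySem.Set.contains, PySem.Set.empty]
  have h2 := pv_foldl_add_filter c t [c] (by simp)
  have h3 : ∀ x ∈ t.filter (fun x => x != c), (x == c) = false := by
    intro x hx
    have := (List.mem_filter.mp hx).2
    simpa [bne] using this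
  rw [h1, h2, pv_foldl_add_cons c _ h3 []]
  rfl

-- B's partition recursion computes the first-occurrence (char, count) pairs
lemma pv_countsB_eq : ∀ (n : ℕ) (cs : List String), cs.length ≤ n →
    pvCountsB cs = (PySem.List.dedup cs).map (fun c => (c, (cs.count c : Int))) := by
  intro n
  induction n with
  | zero =>
    intro cs hcs
    have : cs = [] := List.eq_nil_of_length_eq_zero (Nat.le_zero.mp hcs)
    subst this
    simp [pvCountsB, PySem.List.dedup, PySem.Set.ofList, PySem.Set.empty]
  | succ n ih =>
    intro cs hcs
    cases cs with
    | nil => simp [pvCountsB, PySem.List.dedup, PySem.Set.ofList, PySem.Set.empty]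
    | cons c t =>
      have hrest : (c :: t).filter (fun x => x != c) = t.filter (fun x => x != c) := by
        simp
      have hlen : (t.filter (fun x => x != c)).length ≤ n := by
        have := List.length_filter_le (fun x => x != c) t
        simp at hcs; omega
      have hIH := ih _ hlen
      rw [pvCountsB, hrest, hIH, pv_dedup_cons]
      congr 1
      · -- head: filter-length is the count
        congr 1
        simp [List.count_eq_countP, List.countP_eq_length_filter]
      · -- tail: counts are unchanged by removing c, for keys ≠ c
        apply List.map_congr_left
        intro d hd
        have hdmem : d ∈ t.filter (fun x => x != c) := by simpa using hd
        have hdne : (d == c) = false := by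
          have := (List.mem_filter.mp hdmem).2
          simpa [bne] using this
        have hcount : (t.filter (fun x => x != c)).count d = t.count d := by
          apply List.count_filter
          simpa [bne] using hdne
        have hcons : (c :: t).count d = t.count d := by
          simp [List.count_cons]
          intro h; exact absurd (by simp [h]) (by simp [hdne] : ¬ (d == c) = true)
        rw [hcount, hcons]

-- ===== VERDICT (by name: the statement is the Claim_ definition above) =====
theorem get_room_data_stats_spec : Claim_equal_get_room_data_stats := by
  intro room_data _
  unfold Spec_get_room_data_stats get_room_data_stats get_room_data_stats_alt
  simp only [PySem.List.foldl_append_singleton_eq_map, List.nil_append]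
  exact List.map_congr_left (fun room _ =>
    (pv_room_A _).trans (pv_countsB_eq _ _ le_rfl).symm)
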